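-- pv_equiv track=rewrite | github.com/Drozdova-Daria/python_exam_25_03 | exam/main.py | transition_matrix
-- ===== SOURCE A (Python) =====
-- import collections
--
-- def transition_matrix(language):
--     pairs = []
--     for i in range(len(language)):
--         for j in range(len(language)):
--             if i != j:
--                 pairs.append([language[i], language[j]])
--     d = collections.defaultdict(list)
--     for pair in pairs:
--         matches = [language[i + 2] for i, x in enumerate(language) if i < len(language) - 2 and x == pair[0] and language[i + 1] == pair[1]]
--         if matches:
--             d[tuple(pair)] = matches
--     return d
-- ===== SOURCE B (Python) =====
-- import collections
--
-- def transition_matrix(language):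
--     n = len(language)
--     follow = collections.defaultdict(list)
--     for i in range(n - 2):
--         follow[(language[i], language[i + 1])].append(language[i + 2])
--     d = collections.defaultdict(list)
--     for i, a in enumerate(language):
--         for j, b in enumerate(language):
--             if i != j and (a, b) in follow:
--                 d[(a, b)] = follow[(a, b)]
--     return d
-- ===== Notes on version B (the rewrite author's own statement) =====
-- stated objective: faster
-- what changed: B builds the bigram->followers map in one linear pass over the list (instead of rescanning the whole list for every one of the n^2 candidate pairs) and the pair sweep only does O(1) dict lookups, removing the inner scan.
import Mathlib
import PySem

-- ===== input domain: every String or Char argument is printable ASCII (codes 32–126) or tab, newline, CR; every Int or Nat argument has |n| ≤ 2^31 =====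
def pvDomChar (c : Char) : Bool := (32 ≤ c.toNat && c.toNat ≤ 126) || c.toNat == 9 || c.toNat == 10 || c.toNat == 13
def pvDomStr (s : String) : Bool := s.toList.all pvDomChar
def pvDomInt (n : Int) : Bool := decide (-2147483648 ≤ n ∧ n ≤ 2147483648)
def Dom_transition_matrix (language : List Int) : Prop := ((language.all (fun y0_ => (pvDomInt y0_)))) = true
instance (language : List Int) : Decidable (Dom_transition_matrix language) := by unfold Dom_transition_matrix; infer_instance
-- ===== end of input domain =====

-- B replaces A's per-pair rescan of the whole list by a follower map built in one pass and only
-- looked up during the pair sweep (objective: faster).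
-- Python keys are tuples (a, b); under the type convention both A's tuple(pair) keys and B's
-- tuple keys become the 2-element List Int [a, b].

-- ===== PORT A =====
-- pairs: [[language[i], language[j]] for i in range(n) for j in range(n) if i != j], built by appends as in A
def tmA_pairs (language : List Int) : List (List Int) :=
  (PySem.List.pyRange 0 (PySem.List.len language)).foldl (fun acc i =>
    (PySem.List.pyRange 0 (PySem.List.len language)).foldl (fun acc2 j =>
      if i ≠ j then
        acc2 ++ [[PySem.List.pyGetD language i 0, PySem.List.pyGetD language j 0]]
      else acc2) acc) []

-- matches = [language[i+2] for i, x in enumerate(language) if i < len(language)-2 and x == pair[0] and language[i+1] == pair[1]]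
def tmA_matches (language : List Int) (pair : List Int) : List Int :=
  ((PySem.List.enumerate language).filter (fun p =>
      decide (p.1 < PySem.List.len language - 2) && (p.2 == PySem.List.pyGetD pair 0 0) &&
      (PySem.List.pyGetD language (p.1 + 1) 0 == PySem.List.pyGetD pair 1 0))).map
    (fun p => PySem.List.pyGetD language (p.1 + 2) 0)

def transition_matrix (language : List Int) : List (List Int × List Int) :=
  ((tmA_pairs language).foldl (fun d pair =>
      if tmA_matches language pair ≠ [] then d.insert pair (tmA_matches language pair) else d)
    (PySem.Dict.empty : PySem.Dict (List Int) (List Int))).items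

-- ===== PORT B =====
-- follow[(language[i], language[i+1])].append(language[i+2]) for i in range(n - 2)
def tmB_follow (language : List Int) : PySem.Dict (List Int) (List Int) :=
  (PySem.List.pyRange 0 (PySem.List.len language - 2)).foldl (fun d i =>
    d.modify [PySem.List.pyGetD language i 0, PySem.List.pyGetD language (i + 1) 0] []
      (fun v => v ++ [PySem.List.pyGetD language (i + 2) 0])) PySem.Dict.empty

def transition_matrix_alt (language : List Int) : List (List Int × List Int) :=
  ((PySem.List.enumerate language).foldl (fun d p =>
      (PySem.List.enumerate language).foldl (fun d q =>
        if p.1 ≠ q.1 ∧ (tmB_follow language).contains [p.2, q.2] then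
          d.insert [p.2, q.2] ((tmB_follow language).getD [p.2, q.2] [])
        else d) d)
    (PySem.Dict.empty : PySem.Dict (List Int) (List Int))).items

-- ===== PRECONDITION & SPEC =====
def Spec_transition_matrix (language : List Int) (out : List (List Int × List Int)) : Prop := out = transition_matrix_alt language
instance (language : List Int) (out : List (List Int × List Int)) : Decidable (Spec_transition_matrix language out) := by unfold Spec_transition_matrix; infer_instance

-- ===== CLAIM (what is proved, stated in full; the proofs are below) =====
def Claim_equal_transition_matrix : Prop := ∀ (language : List Int), Dom_transition_matrix language → Spec_transition_matrix language (transition_matrix language)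

-- ===== LEMMAS AND PROOFS =====

-- canonical form of both programs' follower lists, indexed over range(n-2)
def tmMs (language : List Int) (a b : Int) : List Int :=
  ((PySem.List.pyRange 0 (PySem.List.len language - 2)).filter (fun i =>
      (PySem.List.pyGetD language i 0 == a) && (PySem.List.pyGetD language (i + 1) 0 == b))).map
    (fun i => PySem.List.pyGetD language (i + 2) 0)

theorem natRangeFilter (a : Nat) (p : Nat → Bool) : ∀ (b : Nat), a ≤ b →
    (List.range b).filter (fun (k : Nat) => decide ((k : Int) < (a : Int)) && p k) = (List.range a).filter p := by
  intro b
  induction b with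
  | zero => intro h; interval_cases a; simp
  | succ b ih =>
    intro h
    rcases Nat.lt_or_ge a (b+1) with hlt | hge
    · rw [List.range_succ, List.filter_append]
      have hba : ¬ b < a := Nat.not_lt.mpr (Nat.lt_succ_iff.mp hlt)
      have ih' := ih (Nat.lt_succ_iff.mp hlt)
      simp only [Nat.cast_lt] at ih' ⊢
      simp [hba, ih']
    · have ha : a = b + 1 := le_antisymm h hge
      subst ha
      apply List.filter_congr
      intro k hk
      have hkb : k < b + 1 := List.mem_range.mp hk
      simp only [Nat.cast_lt]
      simp [hkb]

theorem tm_filter_range_cut (n m : Int) (p : Int → Bool) (h : m ≤ n) :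
    (PySem.List.pyRange 0 n).filter (fun j => decide (j < m) && p j)
      = (PySem.List.pyRange 0 m).filter p := by
  by_cases hm : m ≤ 0
  · rw [PySem.List.pyRange_one_eq_nil hm, List.filter_eq_nil_iff.mpr, List.filter_nil]
    intro j hj
    have := PySem.List.mem_pyRange_one.mp hj
    simp [show ¬ (j < m) by omega]
  · rw [not_le] at hm
    have hn : 0 < n := lt_of_lt_of_le hm h
    obtain ⟨mn, rfl⟩ : ∃ k : Nat, m = (k:Int) := ⟨m.toNat, (Int.toNat_of_nonneg hm.le).symm⟩
    obtain ⟨nn, rfl⟩ : ∃ k : Nat, n = (k:Int) := ⟨n.toNat, (Int.toNat_of_nonneg hn.le).symm⟩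
    rw [PySem.List.pyRange_zero_natCast, PySem.List.pyRange_zero_natCast,
      List.filter_map, List.filter_map]
    rw [show ((fun j => decide (j < (mn:Int)) && p j) ∘ (fun (k:Nat) => (k:Int)))
        = (fun (k:Nat) => decide ((k:Int) < (mn:Int)) && p (k:Int)) from rfl]
    rw [natRangeFilter mn (fun k => p (k:Int)) nn (by exact_mod_cast h)]
    rfl

theorem tm_follow_eq_pairfold (l : List Int) :
    tmB_follow l = ((PySem.List.pyRange 0 (PySem.List.len l - 2)).map (fun i =>
        ([PySem.List.pyGetD l i 0, PySem.List.pyGetD l (i + 1) 0], PySem.List.pyGetD l (i + 2) 0))).foldl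
      (fun d p => d.modify p.1 [] (fun v => v ++ [p.2])) PySem.Dict.empty := by
  rw [List.foldl_map]
  rfl

theorem tm_getD_follow (l : List Int) (a b : Int) :
    (tmB_follow l).getD [a, b] [] = tmMs l a b := by
  rw [tm_follow_eq_pairfold, PySem.Dict.getD_foldl_modify_append]
  rw [List.filter_map, List.map_map]
  unfold tmMs
  simp only [Function.comp_def]
  rw [PySem.Dict.getD_empty, List.nil_append]
  congr 1
  apply List.filter_congr
  intro i _
  simp [List.cons_beq_cons]

theorem tm_contains_follow (l : List Int) (a b : Int) :
    (tmB_follow l).contains [a, b] = true → tmMs l a b ≠ [] := by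
  intro h
  rw [PySem.Dict.contains_iff_mem_keys] at h
  unfold tmB_follow at h
  rw [PySem.Dict.keys_foldl_modify_key (PySem.List.pyRange 0 (PySem.List.len l - 2))
    (fun i => [PySem.List.pyGetD l i 0, PySem.List.pyGetD l (i + 1) 0]) []
    (fun d i v => v ++ [PySem.List.pyGetD l (i + 2) 0]) PySem.Dict.empty] at h
  rw [PySem.Set.mem_update] at h
  rcases h with h | h
  · simp [PySem.Dict.keys_empty] at h
  · obtain ⟨i, hiR, hkey⟩ := List.mem_map.mp h
    have hab : PySem.List.pyGetD l i 0 = a ∧ PySem.List.pyGetD l (i + 1) 0 = b := by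
      have := hkey
      simp only [List.cons.injEq, and_true] at this
      exact ⟨this.1, this.2⟩
    apply List.ne_nil_of_mem
    refine List.mem_map.mpr ⟨i, List.mem_filter.mpr ⟨hiR, ?_⟩, rfl⟩
    simp [hab.1, hab.2]

theorem tm_matches_eq (l : List Int) (a b : Int) :
    tmA_matches l [a, b] = (tmB_follow l).getD [a, b] [] := by
  rw [tm_getD_follow]
  unfold tmA_matches
  rw [show PySem.List.pyGetD [a, b] 0 0 = a from rfl, show PySem.List.pyGetD [a, b] 1 0 = b from rfl]
  rw [PySem.List.enumerate_eq_map_pyRange l 0, List.filter_map, List.map_map]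
  simp only [Function.comp_def]
  rw [List.filter_congr (q := fun j => decide (j < PySem.List.len l - 2) &&
      ((PySem.List.pyGetD l j 0 == a) && (PySem.List.pyGetD l (j + 1) 0 == b)))
    (fun x _ => by simp [Bool.and_assoc])]
  rw [tm_filter_range_cut (PySem.List.len l) (PySem.List.len l - 2) _ (by omega)]
  rfl

theorem tm_pairs_eq (l : List Int) :
    tmA_pairs l = (PySem.List.pyRange 0 (PySem.List.len l)).flatMap (fun i =>
      ((PySem.List.pyRange 0 (PySem.List.len l)).filter (fun j => decide (i ≠ j))).map
        (fun j => [PySem.List.pyGetD l i 0, PySem.List.pyGetD l j 0])) := by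
  unfold tmA_pairs
  rw [PySem.List.foldl_congr_mem _ _ (fun acc i => acc ++
      ((PySem.List.pyRange 0 (PySem.List.len l)).filter (fun j => decide (i ≠ j))).map
        (fun j => [PySem.List.pyGetD l i 0, PySem.List.pyGetD l j 0])) _ ?_]
  · rw [PySem.List.foldl_append_eq_flatMap, List.nil_append]
  · intro acc i _
    rw [show (fun acc2 j => if i ≠ j then
          acc2 ++ [[PySem.List.pyGetD l i 0, PySem.List.pyGetD l j 0]] else acc2)
        = (fun (acc2 : List (List Int)) j => if (fun j => decide (i ≠ j)) j = true then
          acc2 ++ [(fun j => [PySem.List.pyGetD l i 0, PySem.List.pyGetD l j 0]) j] else acc2) from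
      funext fun acc2 => funext fun j => by simp]
    exact PySem.List.foldl_append_if _ _ _ _

theorem tm_main (l : List Int) : transition_matrix l = transition_matrix_alt l := by
  unfold transition_matrix transition_matrix_alt
  apply congrArg PySem.Dict.items
  rw [tm_pairs_eq, List.foldl_flatMap]
  rw [PySem.List.enumerate_eq_map_pyRange l 0, List.foldl_map]
  simp only [List.foldl_map, List.foldl_filter]
  apply PySem.List.foldl_congr_mem
  intro d i _
  apply PySem.List.foldl_congr_mem
  intro d' j _
  simp only [ite_and]
  by_cases hij : i = j
  · simp [hij]
  · simp only [hij, decide_true, Ne, not_false_iff, if_true]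
    rw [tm_matches_eq]
    by_cases hc : (tmB_follow l).contains [PySem.List.pyGetD l i 0, PySem.List.pyGetD l j 0] = true
    · have hne := tm_contains_follow l _ _ hc
      rw [← tm_getD_follow] at hne
      simp [hc, hne]
    · have hcf : (tmB_follow l).contains [PySem.List.pyGetD l i 0, PySem.List.pyGetD l j 0] = false := by
        simpa using hc
      have h0 := PySem.Dict.getD_of_not_contains (tmB_follow l) ([] : List Int) hcf
      simp [hc, h0]

-- ===== VERDICT (by name: the statement is the Claim_ definition above) =====
theorem transition_matrix_spec : Claim_equal_transition_matrix := by
  intro language _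
  unfold Spec_transition_matrix
  exact tm_main language
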